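-- pv_equiv track=rewrite | github.com/nf-core/rnafusion | bin/generate_report.py | create_tool_detection_chart
-- ===== SOURCE A (Python) =====
-- def create_tool_detection_chart(p_summary):
--     """
--     Helper function that generates Tool detection graph
--     Args:
--         p_summary (dictionary): parsed summary.yaml
--     """
--     result = []
--     all_fusions = []
--     for tool, fusions in p_summary.items():
--         all_fusions.append(fusions)
--         result.append([tool, len(fusions)])
--     result.append(['all tools', len(set.intersection(*map(set, all_fusions)))])
--
--     return result
-- ===== SOURCE B (Python) =====
-- def create_tool_detection_chart(p_summary):
--     """Candidate-and-test variant: per-tool rows via a comprehension; the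
--     'all tools' count is computed by testing each distinct fusion of the
--     first tool for membership in every other tool's list, with no set
--     intersection being built at all."""
--     items = list(p_summary.items())
--     result = [[tool, len(fusions)] for tool, fusions in items]
--     first = items[0][1]
--     rest = [fusions for _, fusions in items[1:]]
--     common = sum(1 for f in set(first) if all(f in fs for fs in rest))
--     result.append(['all tools', common])
--     return result
-- ===== Notes on version B (the rewrite author's own statement) =====
-- stated objective: alternative
-- what changed: B never builds or intersects sets: it deduplicates only the first tool's fusion list and counts those candidates that pass a membership test against every other tool's raw list, whereas A materialises a set per tool and folds set.intersection over all of them; the per-tool rows come from a comprehension instead of being appended in the same loop.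
import Mathlib
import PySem

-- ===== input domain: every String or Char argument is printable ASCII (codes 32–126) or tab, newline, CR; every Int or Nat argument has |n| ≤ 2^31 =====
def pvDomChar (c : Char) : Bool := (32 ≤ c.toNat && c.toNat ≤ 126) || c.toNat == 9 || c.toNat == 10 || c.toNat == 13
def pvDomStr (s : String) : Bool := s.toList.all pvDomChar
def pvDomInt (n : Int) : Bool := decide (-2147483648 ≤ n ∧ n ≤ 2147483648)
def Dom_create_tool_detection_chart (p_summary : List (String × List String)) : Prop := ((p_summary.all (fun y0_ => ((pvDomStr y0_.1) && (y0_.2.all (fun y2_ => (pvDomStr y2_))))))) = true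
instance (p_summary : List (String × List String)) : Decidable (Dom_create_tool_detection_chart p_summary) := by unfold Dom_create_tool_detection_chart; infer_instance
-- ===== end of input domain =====

-- B replaces A's build-a-set-per-tool-and-fold-set.intersection algorithm by a candidate-and-test
-- count over the first tool's distinct fusions (objective: alternative, same asymptotic cost).

-- ===== PORT A =====
-- A: one loop collecting (result rows, all_fusions), then len(set.intersection(*map(set, all_fusions))).
def create_tool_detection_chart (p_summary : List (String × List String)) : List (String × Int) :=
  let st := (PySem.Dict.ofList p_summary).items.foldl
    (fun (acc : List (String × Int) × List (List String)) tf =>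
      (acc.1 ++ [(tf.1, (tf.2.length : Int))], acc.2 ++ [tf.2])) ([], [])
  match st.2 with
  | [] => st.1  -- Python raises TypeError here (set.intersection with no arguments); excluded by Pre_
  | f :: rest =>
      st.1 ++ [("all tools",
        (PySem.Set.len ((rest.map (fun g => PySem.Set.ofList g)).foldl
          (fun s t => PySem.Set.inter s t) (PySem.Set.ofList f)) : Int))]

-- ===== PORT B =====
-- B: rows by a map over items; 'all tools' = count of distinct fusions of the first tool
-- that occur (plain list membership) in every other tool's list; no set intersection.
def create_tool_detection_chart_alt (p_summary : List (String × List String)) : List (String × Int) :=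
  let items := (PySem.Dict.ofList p_summary).items
  let result := items.map (fun tf => (tf.1, (tf.2.length : Int)))
  match items with
  | [] => result  -- Python raises IndexError here (items[0] on empty); excluded by Pre_
  | x :: tl =>
      let rest := tl.map (fun tf => tf.2)
      let common : Int :=
        ((PySem.Set.ofList x.2).countP (fun f => rest.all (fun fs => fs.contains f)) : Int)
      result ++ [("all tools", common)]

-- ===== PRECONDITION & SPEC =====
-- Pre_ excludes only the empty dict, on which both Pythons raise (A: TypeError, B: IndexError).
def Pre_create_tool_detection_chart (p_summary : List (String × List String)) : Prop :=
  p_summary ≠ []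
instance (p_summary : List (String × List String)) : Decidable (Pre_create_tool_detection_chart p_summary) := by unfold Pre_create_tool_detection_chart; infer_instance
def pvWitness_create_tool_detection_chart : (List (String × List String)) := [("arriba", ["A--B"])]
def Spec_create_tool_detection_chart (p_summary : List (String × List String)) (out : List (String × Int)) : Prop := out = create_tool_detection_chart_alt p_summary
instance (p_summary : List (String × List String)) (out : List (String × Int)) : Decidable (Spec_create_tool_detection_chart p_summary out) := by unfold Spec_create_tool_detection_chart; infer_instance

-- ===== CLAIM =====
def Claim_equal_create_tool_detection_chart : Prop := ∀ (p_summary : List (String × List String)), Dom_create_tool_detection_chart p_summary → Pre_create_tool_detection_chart p_summary → Spec_create_tool_detection_chart p_summary (create_tool_detection_chart p_summary)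

-- ===== LEMMAS AND PROOFS =====

theorem pvA_fold (l : List (String × List String)) (r : List (String × Int)) (fs : List (List String)) :
    l.foldl (fun (acc : List (String × Int) × List (List String)) tf =>
      (acc.1 ++ [(tf.1, (tf.2.length : Int))], acc.2 ++ [tf.2])) (r, fs)
    = (r ++ l.map (fun tf => (tf.1, (tf.2.length : Int))), fs ++ l.map (·.2)) := by
  induction l generalizing r fs with
  | nil => simp
  | cons x xs ih => simp [List.foldl_cons, ih]

theorem pv_inter_fold (gs : List (List String)) (s : PySem.Set String) :
    (gs.map (fun g => PySem.Set.ofList g)).foldl (fun s t => PySem.Set.inter s t) s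
    = s.filter (fun f => gs.all (fun g => g.contains f)) := by
  induction gs generalizing s with
  | nil => simp
  | cons g gs ih =>
      simp only [List.map_cons, List.foldl_cons]
      rw [ih]
      simp only [PySem.Set.inter]
      rw [List.filter_filter]
      apply List.filter_congr
      intro x _
      simp [Bool.and_comm]

theorem pv_items_ne_nil (p : List (String × List String)) (hp : p ≠ []) :
    (PySem.Dict.ofList p).items ≠ [] := by
  intro h
  have hk : (PySem.Dict.ofList p).keys = [] := by
    simp [PySem.Dict.keys, h]
  have : (PySem.Dict.ofList p).keys
      = PySem.Set.ofList (p.map (·.1)) := by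
    have h1 : PySem.Dict.ofList p
        = p.foldl (fun d kv => d.insert kv.1 kv.2) PySem.Dict.empty := rfl
    rw [h1, PySem.Dict.keys_foldl_insert_key (l := p) (key := fun (kv : String × List String) => kv.1) (f := fun d (kv : String × List String) => kv.2) (d := PySem.Dict.empty)]
    simp [PySem.Dict.keys_empty, PySem.Set.update_nil_left]
  rw [this] at hk
  cases p with
  | nil => exact hp rfl
  | cons y t => simp [PySem.Set.ofList_cons] at hk

-- ===== VERDICT =====
theorem create_tool_detection_chart_spec : Claim_equal_create_tool_detection_chart := by
  intro p _ hpre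
  unfold Spec_create_tool_detection_chart create_tool_detection_chart create_tool_detection_chart_alt
  obtain ⟨x, xs, hix⟩ := List.exists_cons_of_ne_nil (pv_items_ne_nil p hpre)
  rw [hix]
  simp only [List.foldl_cons, List.nil_append, List.map_cons]
  rw [pvA_fold]
  simp only [List.nil_append, List.cons_append]
  rw [pv_inter_fold]
  simp [PySem.Set.len, List.countP_eq_length_filter]
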